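-- pv_equiv track=rewrite | github.com/abdullahau/Python-Programming-MOOC | course-submission-files/mooc-programming-24/part04-38_grade_statistics/src/grade_statistics.py | grade_conversion
-- ===== SOURCE A (Python) =====
-- def grade_conversion(total_point: int, exam_point: int) -> int:
--     grade_list = [0, 1, 2, 3, 4, 5]
--     point_list = [0, 15, 18, 21, 24, 28]
--
--     if exam_point >= 10:
--         for i in range(len(point_list)):
--             if total_point >= point_list[i]:
--                 grade = grade_list[i]
--             else:
--                 grade = grade_list[i-1]
--                 break
--     else:
--         grade = 0
--
--     return grade
-- ===== SOURCE B (Python) =====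
-- THRESHOLDS = [15, 18, 21, 24, 28]
--
-- def grade_conversion(total_point: int, exam_point: int) -> int:
--     if exam_point < 10:
--         return 0
--     # grade = number of thresholds <= total_point, found by binary search
--     lo, hi = 0, len(THRESHOLDS)
--     while lo < hi:
--         mid = (lo + hi) // 2
--         if THRESHOLDS[mid] <= total_point:
--             lo = mid + 1
--         else:
--             hi = mid
--     return lo
-- ===== Notes on version B (the rewrite author's own statement) =====
-- stated objective: alternative
-- what changed: Replaced the linear scan with break and back-reference over parallel grade/point lists by a hand-written binary search counting thresholds <= total_point.
-- intended difference: For exam_point >= 10 and total_point < 0, A returns 5 (grade_list[-1] wraps to the last element), while B returns grade 0, the intended grade for a total below every threshold. — e.g. on grade_conversion(-3, 10): A returns 5, B returns 0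
import Mathlib
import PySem

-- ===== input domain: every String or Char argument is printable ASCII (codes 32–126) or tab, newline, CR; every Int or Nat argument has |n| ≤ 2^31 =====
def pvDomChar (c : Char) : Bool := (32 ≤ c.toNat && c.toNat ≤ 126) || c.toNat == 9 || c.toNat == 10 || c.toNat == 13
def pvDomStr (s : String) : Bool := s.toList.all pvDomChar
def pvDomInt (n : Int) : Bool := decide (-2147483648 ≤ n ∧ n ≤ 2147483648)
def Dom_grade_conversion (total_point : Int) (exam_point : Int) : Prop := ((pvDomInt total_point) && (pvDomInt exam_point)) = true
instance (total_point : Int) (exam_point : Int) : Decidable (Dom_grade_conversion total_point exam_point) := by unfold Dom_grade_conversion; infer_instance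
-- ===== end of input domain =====

-- B replaces A's linear scan-with-break by a binary search over the thresholds (alternative
-- decomposition, same cost at this fixed size); on negative totals with exam_point >= 10 B returns
-- the intended grade 0 where A's negative-index wraparound returns 5 (see D_ below).

-- ===== PORT A =====
-- the for-loop over range(6): i :: rest is the remaining range, `grade` the loop variable
def gcLoopA (total_point : Int) (grade_list point_list : List Int) : List Int → Int → Int
  | [], grade => grade
  | i :: rest, grade =>
      if total_point ≥ (PySem.List.pyGet? point_list i).getD 0 then
        gcLoopA total_point grade_list point_list rest ((PySem.List.pyGet? grade_list i).getD 0)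
      else
        (PySem.List.pyGet? grade_list (i - 1)).getD 0   -- grade = grade_list[i-1]; break

def grade_conversion (total_point : Int) (exam_point : Int) : Int :=
  let grade_list : List Int := [0, 1, 2, 3, 4, 5]
  let point_list : List Int := [0, 15, 18, 21, 24, 28]
  if exam_point ≥ 10 then
    -- in Python `grade` is first assigned at i = 0 (one branch always fires); 0 is a dummy initial value
    gcLoopA total_point grade_list point_list (PySem.List.pyRange 0 6 1) 0
  else
    0

-- ===== PORT B =====
-- the while lo < hi loop of Source B's binary search; fuel = len(THRESHOLDS) iterations suffice
-- (each step halves hi - lo, which starts at 5), so the fuel guard only makes the loop total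
def gcBisect (total_point : Int) (thresholds : List Int) : Nat → Nat → Nat → Nat
  | 0, lo, _ => lo
  | fuel + 1, lo, hi =>
    if lo < hi then
      let mid := (lo + hi) / 2
      if (PySem.List.pyGet? thresholds (mid : Int)).getD 0 ≤ total_point then
        gcBisect total_point thresholds fuel (mid + 1) hi
      else
        gcBisect total_point thresholds fuel lo mid
    else lo

def grade_conversion_alt (total_point : Int) (exam_point : Int) : Int :=
  if exam_point < 10 then 0
  else (gcBisect total_point [15, 18, 21, 24, 28] 5 0 5 : Int)

-- ===== PRECONDITION & SPEC =====
-- For exam_point >= 10 and total_point < 0, A returns 5 (grade_list[-1] wraps to the last element),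
-- while B returns grade 0, the intended grade for a total below every threshold.
def D_grade_conversion (total_point : Int) (exam_point : Int) : Prop :=
  exam_point ≥ 10 ∧ total_point < 0
instance (total_point : Int) (exam_point : Int) : Decidable (D_grade_conversion total_point exam_point) := by unfold D_grade_conversion; infer_instance

def Spec_grade_conversion (total_point : Int) (exam_point : Int) (out : Int) : Prop := ¬ D_grade_conversion total_point exam_point → out = grade_conversion_alt total_point exam_point
instance (total_point : Int) (exam_point : Int) (out : Int) : Decidable (Spec_grade_conversion total_point exam_point out) := by unfold Spec_grade_conversion; infer_instance

def pvDiffWitness_grade_conversion : Int × Int := (-3, 10)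
def pvDiffWitnessOut_grade_conversion : Int × Int := (5, 0)

-- ===== CLAIM (what is proved, stated in full; the proofs are below) =====
def Claim_unchanged_grade_conversion : Prop := ∀ (total_point : Int) (exam_point : Int), Dom_grade_conversion total_point exam_point → Spec_grade_conversion total_point exam_point (grade_conversion total_point exam_point)
def Claim_changed_grade_conversion : Prop := Dom_grade_conversion (pvDiffWitness_grade_conversion.1) (pvDiffWitness_grade_conversion.2) ∧ D_grade_conversion (pvDiffWitness_grade_conversion.1) (pvDiffWitness_grade_conversion.2) ∧ grade_conversion (pvDiffWitness_grade_conversion.1) (pvDiffWitness_grade_conversion.2) = pvDiffWitnessOut_grade_conversion.1 ∧ grade_conversion_alt (pvDiffWitness_grade_conversion.1) (pvDiffWitness_grade_conversion.2) = pvDiffWitnessOut_grade_conversion.2 ∧ pvDiffWitnessOut_grade_conversion.1 ≠ pvDiffWitnessOut_grade_conversion.2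
def Claim_exact_grade_conversion : Prop := ∀ (total_point : Int) (exam_point : Int), Dom_grade_conversion total_point exam_point → D_grade_conversion total_point exam_point → grade_conversion total_point exam_point ≠ grade_conversion_alt total_point exam_point

-- ===== LEMMAS AND PROOFS =====

-- closed form of A's loop for exam_point ≥ 10
theorem gcLoopA_closed (t : Int) :
    gcLoopA t [0, 1, 2, 3, 4, 5] [0, 15, 18, 21, 24, 28] (PySem.List.pyRange 0 6 1) 0 =
      if t < 0 then 5 else if t < 15 then 0 else if t < 18 then 1 else if t < 21 then 2
      else if t < 24 then 3 else if t < 28 then 4 else 5 := by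
  have h : PySem.List.pyRange 0 6 1 = [0, 1, 2, 3, 4, 5] := by decide
  rw [h]
  simp only [gcLoopA,
    show (PySem.List.pyGet? ([0,15,18,21,24,28]:List Int) 0).getD 0 = 0 from rfl,
    show (PySem.List.pyGet? ([0,15,18,21,24,28]:List Int) 1).getD 0 = 15 from rfl,
    show (PySem.List.pyGet? ([0,15,18,21,24,28]:List Int) 2).getD 0 = 18 from rfl,
    show (PySem.List.pyGet? ([0,15,18,21,24,28]:List Int) 3).getD 0 = 21 from rfl,
    show (PySem.List.pyGet? ([0,15,18,21,24,28]:List Int) 4).getD 0 = 24 from rfl,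
    show (PySem.List.pyGet? ([0,15,18,21,24,28]:List Int) 5).getD 0 = 28 from rfl,
    show (PySem.List.pyGet? ([0,1,2,3,4,5]:List Int) 0).getD 0 = 0 from rfl,
    show (PySem.List.pyGet? ([0,1,2,3,4,5]:List Int) 1).getD 0 = 1 from rfl,
    show (PySem.List.pyGet? ([0,1,2,3,4,5]:List Int) 2).getD 0 = 2 from rfl,
    show (PySem.List.pyGet? ([0,1,2,3,4,5]:List Int) 3).getD 0 = 3 from rfl,
    show (PySem.List.pyGet? ([0,1,2,3,4,5]:List Int) 4).getD 0 = 4 from rfl,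
    show (PySem.List.pyGet? ([0,1,2,3,4,5]:List Int) 5).getD 0 = 5 from rfl,
    show (PySem.List.pyGet? ([0,1,2,3,4,5]:List Int) (0-1)).getD 0 = 5 from rfl,
    show (PySem.List.pyGet? ([0,1,2,3,4,5]:List Int) (1-1)).getD 0 = 0 from rfl,
    show (PySem.List.pyGet? ([0,1,2,3,4,5]:List Int) (2-1)).getD 0 = 1 from rfl,
    show (PySem.List.pyGet? ([0,1,2,3,4,5]:List Int) (3-1)).getD 0 = 2 from rfl,
    show (PySem.List.pyGet? ([0,1,2,3,4,5]:List Int) (4-1)).getD 0 = 3 from rfl,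
    show (PySem.List.pyGet? ([0,1,2,3,4,5]:List Int) (5-1)).getD 0 = 4 from rfl]
  split_ifs <;> omega

-- closed form of B's binary search
theorem gcBisect_closed (t : Int) :
    gcBisect t [15, 18, 21, 24, 28] 5 0 5 =
      if t < 15 then 0 else if t < 18 then 1 else if t < 21 then 2
      else if t < 24 then 3 else if t < 28 then 4 else 5 := by
  rcases lt_or_ge t 15 with h1 | h1
  · simp [gcBisect, PySem.List.pyGet?, PySem.List.pyIdx?, show (¬ (15:Int) ≤ t) from by omega, show (t < (15:Int)) from by omega, show (¬ (18:Int) ≤ t) from by omega, show (t < (18:Int)) from by omega, show (¬ (21:Int) ≤ t) from by omega, show (t < (21:Int)) from by omega, show (¬ (24:Int) ≤ t) from by omega, show (t < (24:Int)) from by omega, show (¬ (28:Int) ≤ t) from by omega, show (t < (28:Int)) from by omega]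
  rcases lt_or_ge t 18 with h2 | h2
  · simp [gcBisect, PySem.List.pyGet?, PySem.List.pyIdx?, show ((15:Int) ≤ t) from by omega, show (¬ t < (15:Int)) from by omega, show (¬ (18:Int) ≤ t) from by omega, show (t < (18:Int)) from by omega, show (¬ (21:Int) ≤ t) from by omega, show (t < (21:Int)) from by omega, show (¬ (24:Int) ≤ t) from by omega, show (t < (24:Int)) from by omega, show (¬ (28:Int) ≤ t) from by omega, show (t < (28:Int)) from by omega]
  rcases lt_or_ge t 21 with h3 | h3
  · simp [gcBisect, PySem.List.pyGet?, PySem.List.pyIdx?, show ((15:Int) ≤ t) from by omega, show (¬ t < (15:Int)) from by omega, show ((18:Int) ≤ t) from by omega, show (¬ t < (18:Int)) from by omega, show (¬ (21:Int) ≤ t) from by omega, show (t < (21:Int)) from by omega, show (¬ (24:Int) ≤ t) from by omega, show (t < (24:Int)) from by omega, show (¬ (28:Int) ≤ t) from by omega, show (t < (28:Int)) from by omega]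
  rcases lt_or_ge t 24 with h4 | h4
  · simp [gcBisect, PySem.List.pyGet?, PySem.List.pyIdx?, show ((15:Int) ≤ t) from by omega, show (¬ t < (15:Int)) from by omega, show ((18:Int) ≤ t) from by omega, show (¬ t < (18:Int)) from by omega, show ((21:Int) ≤ t) from by omega, show (¬ t < (21:Int)) from by omega, show (¬ (24:Int) ≤ t) from by omega, show (t < (24:Int)) from by omega, show (¬ (28:Int) ≤ t) from by omega, show (t < (28:Int)) from by omega]
  rcases lt_or_ge t 28 with h5 | h5
  · simp [gcBisect, PySem.List.pyGet?, PySem.List.pyIdx?, show ((15:Int) ≤ t) from by omega, show (¬ t < (15:Int)) from by omega, show ((18:Int) ≤ t) from by omega, show (¬ t < (18:Int)) from by omega, show ((21:Int) ≤ t) from by omega, show (¬ t < (21:Int)) from by omega, show ((24:Int) ≤ t) from by omega, show (¬ t < (24:Int)) from by omega, show (¬ (28:Int) ≤ t) from by omega, show (t < (28:Int)) from by omega]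
  simp [gcBisect, PySem.List.pyGet?, PySem.List.pyIdx?, show ((15:Int) ≤ t) from by omega, show (¬ t < (15:Int)) from by omega, show ((18:Int) ≤ t) from by omega, show (¬ t < (18:Int)) from by omega, show ((21:Int) ≤ t) from by omega, show (¬ t < (21:Int)) from by omega, show ((24:Int) ≤ t) from by omega, show (¬ t < (24:Int)) from by omega, show ((28:Int) ≤ t) from by omega, show (¬ t < (28:Int)) from by omega]

-- ===== VERDICT (by name: the statement is the Claim_ definition above) =====
theorem grade_conversion_spec : Claim_unchanged_grade_conversion := by
  intro t e _ hnd
  simp only [D_grade_conversion, not_and, not_lt] at hnd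
  simp only [grade_conversion, grade_conversion_alt]
  by_cases he : e ≥ 10
  · have ht : 0 ≤ t := hnd he
    simp only [he, if_true, show ¬ e < 10 by omega, if_false]
    rw [gcLoopA_closed, gcBisect_closed]
    split_ifs <;> first | rfl | omega
  · simp [he, show e < 10 by omega]

theorem grade_conversion_changed : Claim_changed_grade_conversion := by
  unfold Claim_changed_grade_conversion; decide

theorem grade_conversion_tight : Claim_exact_grade_conversion := by
  intro t e _ hd
  obtain ⟨he, ht⟩ := hd
  simp only [grade_conversion, grade_conversion_alt]
  simp only [he, if_true, show ¬ e < 10 by omega, if_false]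
  rw [gcLoopA_closed, gcBisect_closed]
  simp only [ht, if_true, show t < 15 by omega, if_pos]
  norm_num
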